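-- pv_equiv track=rewrite | github.com/PedroBernini/genomas-web | Src/genomeweb/deeplearning/operationsPermutation.py | applyReversal
-- ===== SOURCE A (Python) =====
-- def applyReversal(permutation, i, j):
--     permutation = list(permutation)
--     if(i > j):
--         i, j = j, i
--     strip = [permutation[k] for k in range(i, j + 1)]
--     strip.reverse()
--     for k in range(i, j + 1):
--         permutation[k] = strip[k - i]
--     return permutation
-- ===== SOURCE B (Python) =====
-- def applyReversal(permutation, i, j):
--     permutation = list(permutation)
--     if i > j:
--         i, j = j, i
--     lo, hi = i, j
--     while lo < hi:
--         permutation[lo], permutation[hi] = permutation[hi], permutation[lo]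
--         lo += 1
--         hi -= 1
--     return permutation
-- ===== Notes on version B (the rewrite author's own statement) =====
-- stated objective: idiomatic
-- what changed: Replaced A's copy-the-segment-into-an-auxiliary-strip, reverse it, then write it back front-to-back by a single in-place two-pointer loop that swaps the ends and converges inward, with no auxiliary list.
-- outside the precondition, e.g. on applyReversal([10, 20], -2, 1): A returns [20, 10], B returns [10, 20]
import Mathlib
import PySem

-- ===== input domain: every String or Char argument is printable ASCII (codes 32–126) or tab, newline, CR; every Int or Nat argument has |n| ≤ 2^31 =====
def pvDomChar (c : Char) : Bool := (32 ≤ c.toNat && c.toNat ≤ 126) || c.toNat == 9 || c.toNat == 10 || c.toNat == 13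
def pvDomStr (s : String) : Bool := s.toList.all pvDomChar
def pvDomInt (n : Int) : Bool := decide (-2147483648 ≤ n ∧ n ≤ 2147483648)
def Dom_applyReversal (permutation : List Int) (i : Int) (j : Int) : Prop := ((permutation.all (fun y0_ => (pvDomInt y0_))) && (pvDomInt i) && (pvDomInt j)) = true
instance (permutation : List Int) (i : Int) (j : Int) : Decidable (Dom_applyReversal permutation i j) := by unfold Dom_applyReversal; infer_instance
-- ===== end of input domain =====

-- B replaces A's copy-reverse-write-back of the segment by an in-place two-pointer swap
-- loop converging from both ends (no auxiliary strip list); equal return value on Pre_.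


-- ===== PORT A =====
-- literal port of A: copy, order the bounds, copy the segment into `strip`
-- (pyGetD's default 0 is never used inside Pre_, where every index is in range),
-- reverse the strip, then write it back index by index.
def applyReversal (permutation : List Int) (i : Int) (j : Int) : List Int :=
  let ij := if i > j then (j, i) else (i, j)
  let i' := ij.1
  let j' := ij.2
  let strip := (PySem.List.pyRange i' (j' + 1) 1).map (fun k => PySem.List.pyGetD permutation k 0)
  let strip2 := strip.reverse
  (PySem.List.pyRange i' (j' + 1) 1).foldl
    (fun q k => PySem.List.pySetD q k (PySem.List.pyGetD strip2 (k - i') 0)) permutation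

-- ===== PORT B =====
-- the while-loop of Source B: swap the ends, move the two pointers inward.
def revSwapB (p : List Int) (lo hi : Int) : List Int :=
  if lo < hi then
    revSwapB
      (PySem.List.pySetD (PySem.List.pySetD p lo (PySem.List.pyGetD p hi 0)) hi
        (PySem.List.pyGetD p lo 0))
      (lo + 1) (hi - 1)
  else p
termination_by (hi - lo).toNat

def applyReversal_alt (permutation : List Int) (i : Int) (j : Int) : List Int :=
  if i > j then revSwapB permutation j i else revSwapB permutation i j

-- ===== PRECONDITION & SPEC =====
-- Pre_ excludes the inputs where A raises IndexError (some used index outside [-len, len))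
-- and the wrapped aliasing segments (span ≥ len, reachable only through a negative lower
-- index), where A still returns but the order of the aliased write-backs is an accident of
-- either implementation and the two programs' values are equally defensible.
def Pre_applyReversal (permutation : List Int) (i : Int) (j : Int) : Prop :=
  -(permutation.length : Int) ≤ min i j ∧ max i j < (permutation.length : Int) ∧
    max i j - min i j < (permutation.length : Int)
instance (permutation : List Int) (i : Int) (j : Int) : Decidable (Pre_applyReversal permutation i j) := by unfold Pre_applyReversal; infer_instance
def pvWitness_applyReversal : List Int × Int × Int := ([1, 2, 3], 0, 2)

def Spec_applyReversal (permutation : List Int) (i : Int) (j : Int) (out : List Int) : Prop := out = applyReversal_alt permutation i j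
instance (permutation : List Int) (i : Int) (j : Int) (out : List Int) : Decidable (Spec_applyReversal permutation i j out) := by unfold Spec_applyReversal; infer_instance

-- ===== CLAIM (what is proved, stated in full; the proofs are below) =====
def Claim_equal_applyReversal : Prop := ∀ (permutation : List Int) (i : Int) (j : Int), Dom_applyReversal permutation i j → Pre_applyReversal permutation i j → Spec_applyReversal permutation i j (applyReversal permutation i j)

-- ===== LEMMAS AND PROOFS =====

/-- The actual (Nat) position Python's index `k` denotes in a list of length `n`. -/
def pvPos (n : ℕ) (k : Int) : ℕ := if 0 ≤ k then k.toNat else n - (-k).toNat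

theorem pyIdx?_eq_pos (n : ℕ) (k : Int) (h1 : -(n : Int) ≤ k) (h2 : k < n) :
    PySem.List.pyIdx? n k = some (pvPos n k) := by
  unfold PySem.List.pyIdx? pvPos
  split_ifs <;> first | rfl | omega

theorem pvPos_lt (n : ℕ) (k : Int) (h1 : -(n : Int) ≤ k) (h2 : k < n) (h0 : 0 < n) :
    pvPos n k < n := by
  unfold pvPos; split_ifs <;> omega

theorem pvPos_inj (n : ℕ) (k₁ k₂ : Int) (h1 : -(n : Int) ≤ k₁) (h2 : k₁ < n)
    (h3 : -(n : Int) ≤ k₂) (h4 : k₂ < n) (h5 : k₁ - k₂ < n) (h6 : k₂ - k₁ < n)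
    (h : pvPos n k₁ = pvPos n k₂) : k₁ = k₂ := by
  unfold pvPos at h; split_ifs at h <;> omega

theorem getD_bridge (p : List Int) (k : Int) (d : Int)
    (h1 : -(p.length : Int) ≤ k) (h2 : k < p.length) :
    PySem.List.pyGetD p k d = p.getD (pvPos p.length k) d := by
  unfold PySem.List.pyGetD PySem.List.pyGet?
  rw [pyIdx?_eq_pos _ _ h1 h2]
  simp [List.getD_eq_getElem?_getD]

theorem setD_bridge (p : List Int) (k : Int) (v : Int)
    (h1 : -(p.length : Int) ≤ k) (h2 : k < p.length) :
    PySem.List.pySetD p k v = p.set (pvPos p.length k) v := by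
  unfold PySem.List.pySetD PySem.List.pySet?
  rw [pyIdx?_eq_pos _ _ h1 h2]
  rfl

/-- Perform a list of (position, value) assignments in order. -/
def assignAll (p : List Int) (ps : List (ℕ × Int)) : List Int :=
  ps.foldl (fun q x => q.set x.1 x.2) p

theorem assignAll_nil (p : List Int) : assignAll p [] = p := rfl

theorem assignAll_cons (p : List Int) (x : ℕ × Int) (ps : List (ℕ × Int)) :
    assignAll p (x :: ps) = assignAll (p.set x.1 x.2) ps := rfl

theorem assignAll_append_single (a : ℕ) (v : Int) (ps : List (ℕ × Int)) :
    ∀ p : List Int, (∀ x ∈ ps, x.1 ≠ a) →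
      assignAll p (ps ++ [(a, v)]) = assignAll (p.set a v) ps := by
  induction ps with
  | nil => intro p _; rfl
  | cons x ps ih =>
    intro p h
    rw [List.cons_append, assignAll_cons, assignAll_cons,
      ih _ (fun y hy => h y (List.mem_cons_of_mem _ hy)),
      List.set_comm _ _ (h x (List.mem_cons_self))]

theorem getD_set_set_ne (p : List Int) (a b m : ℕ) (va vb d : Int)
    (h1 : m ≠ a) (h2 : m ≠ b) :
    ((p.set a va).set b vb).getD m d = p.getD m d := by
  rw [List.getD_eq_getElem?_getD, List.getElem?_set_ne (Ne.symm h2),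
    List.getElem?_set_ne (Ne.symm h1), List.getD_eq_getElem?_getD]

/-- The list of assignments "reverse the window [lo,hi]" performs, reading from `p`. -/
def mkFor (n : ℕ) (p : List Int) (lo hi : Int) : List (ℕ × Int) :=
  (List.range (hi + 1 - lo).toNat).map
    (fun t : ℕ => (pvPos n (lo + (t : Int)), p.getD (pvPos n (hi - (t : Int))) 0))

theorem foldl_setD_eq_assignAll (v : Int → Int) : ∀ (ks : List Int) (q : List Int),
    (∀ k ∈ ks, -(q.length : Int) ≤ k ∧ k < q.length) →
    ks.foldl (fun q k => PySem.List.pySetD q k (v k)) q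
      = assignAll q (ks.map (fun k => (pvPos q.length k, v k))) := by
  intro ks
  induction ks with
  | nil => intro q _; rfl
  | cons k ks ih =>
    intro q h
    obtain ⟨hk1, hk2⟩ := h k List.mem_cons_self
    rw [List.foldl_cons, List.map_cons, assignAll_cons, setD_bridge q k (v k) hk1 hk2,
      ih _ (by
        intro k' hk'
        rw [List.length_set]
        exact h k' (List.mem_cons_of_mem _ hk'))]
    simp [List.length_set]

theorem A_norm (p : List Int) (lo hi : Int)
    (h1 : -(p.length : Int) ≤ lo) (h2 : hi < p.length) (h3 : lo ≤ hi)
    (h4 : hi - lo < p.length) :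
    (PySem.List.pyRange lo (hi + 1) 1).foldl
      (fun q k => PySem.List.pySetD q k (PySem.List.pyGetD
        (((PySem.List.pyRange lo (hi + 1) 1).map
          (fun k => PySem.List.pyGetD p k 0)).reverse) (k - lo) 0)) p
    = assignAll p (mkFor p.length p lo hi) := by
  have hvalid : ∀ k ∈ PySem.List.pyRange lo (hi + 1) 1,
      -(p.length : Int) ≤ k ∧ k < p.length := by
    intro k hk
    rw [PySem.List.mem_pyRange_one] at hk
    omega
  rw [foldl_setD_eq_assignAll
    (fun k => PySem.List.pyGetD (((PySem.List.pyRange lo (hi + 1) 1).map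
      (fun k => PySem.List.pyGetD p k 0)).reverse) (k - lo) 0)
    (PySem.List.pyRange lo (hi + 1) 1) p hvalid]
  unfold mkFor
  rw [PySem.List.pyRange_one, List.map_map]
  congr 1
  apply List.map_congr_left
  intro t ht
  rw [List.mem_range] at ht
  have hM : ((hi + 1 - lo).toNat : Int) = hi + 1 - lo := by omega
  simp only [Function.comp]
  congr 1
  have e0 : lo + (t : Int) - lo = (t : Int) := by ring
  rw [e0, PySem.List.pyGetD_natCast]
  rw [List.getD_eq_getElem _ _ (by simpa using ht)]
  rw [List.getElem_reverse]
  simp only [List.getElem_map, List.getElem_range, List.length_map, List.length_range]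
  rw [getD_bridge p _ 0 (by omega) (by omega)]
  congr 2
  omega

theorem B_main (c : ℕ) : ∀ (q : List Int) (lo hi : Int), (hi - lo).toNat = c →
    -(q.length : Int) ≤ lo → lo ≤ hi → hi < q.length → hi - lo < q.length →
    revSwapB q lo hi = assignAll q (mkFor q.length q lo hi) := by
  induction c using Nat.strong_induction_on with
  | _ c ih =>
  intro q lo hi hc h1 h2 h3 h4
  have hn0 : 0 < q.length := by omega
  by_cases hlt : lo < hi
  · -- one swap, then recurse on the interior
    rw [revSwapB, if_pos hlt]
    rw [getD_bridge q hi 0 (by omega) (by omega), getD_bridge q lo 0 (by omega) (by omega),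
      setD_bridge q lo _ (by omega) (by omega),
      setD_bridge _ hi _ (by rw [List.length_set]; omega) (by rw [List.length_set]; omega)]
    simp only [List.length_set]
    have hne : pvPos q.length lo ≠ pvPos q.length hi := by
      intro h
      exact absurd (pvPos_inj _ _ _ (by omega) (by omega) (by omega) (by omega)
        (by omega) (by omega) h) (by omega)
    by_cases hlt2 : lo + 1 ≤ hi - 1
    · rw [ih (hi - 1 - (lo + 1)).toNat (by omega) _ (lo + 1) (hi - 1) rfl
        (by simp only [List.length_set]; omega) (by omega)
        (by simp only [List.length_set]; omega)
        (by simp only [List.length_set]; omega)]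
      simp only [List.length_set]
      have hmm : (hi + 1 - lo).toNat = (hi - lo - 1).toNat + 2 := by omega
      have hmm2 : (hi - 1 + 1 - (lo + 1)).toNat = (hi - lo - 1).toNat := by omega
      unfold mkFor
      rw [hmm, hmm2, List.range_succ, List.range_succ_eq_map]
      simp only [List.map_append, List.map_cons, List.map_map, List.map_nil,
        List.cons_append, Nat.cast_zero, add_zero, sub_zero]
      rw [assignAll_cons]
      rw [assignAll_append_single _ _ _ _ (by
        intro x hx
        obtain ⟨s, hs, rfl⟩ := List.mem_map.mp hx
        rw [List.mem_range] at hs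
        simp only [Function.comp]
        intro hEq
        have := pvPos_inj q.length (lo + ((s.succ : ℕ) : Int)) (lo + (((hi - lo - 1).toNat + 1 : ℕ) : Int))
          (by push_cast; omega) (by push_cast; omega) (by push_cast; omega)
          (by push_cast; omega) (by push_cast; omega) (by push_cast; omega) hEq
        push_cast at this
        omega)]
      have eA : lo + (((hi - lo - 1).toNat + 1 : ℕ) : Int) = hi := by push_cast; omega
      have eB : hi - (((hi - lo - 1).toNat + 1 : ℕ) : Int) = lo := by push_cast; omega
      rw [eA, eB]
      congr 1
      apply List.map_congr_left
      intro s hs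
      rw [List.mem_range] at hs
      simp only [Function.comp]
      have e1 : lo + ((s.succ : ℕ) : Int) = lo + 1 + (s : Int) := by push_cast; omega
      have e2 : hi - ((s.succ : ℕ) : Int) = hi - 1 - (s : Int) := by push_cast; omega
      rw [e1, e2]
      congr 1
      rw [getD_set_set_ne]
      · intro h
        have := pvPos_inj q.length (hi - 1 - (s : Int)) lo (by omega) (by omega)
          (by omega) (by omega) (by omega) (by omega) h
        omega
      · intro h
        have := pvPos_inj q.length (hi - 1 - (s : Int)) hi (by omega) (by omega)
          (by omega) (by omega) (by omega) (by omega) h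
        omega
    · -- hi = lo + 1 : the single swap finishes
      have hhl : hi = lo + 1 := by omega
      rw [revSwapB, if_neg (by omega)]
      unfold mkFor
      rw [show (hi + 1 - lo).toNat = 2 from by omega,
        show List.range 2 = [0, 1] from by decide]
      simp only [List.map_cons, List.map_nil, Nat.cast_zero, Nat.cast_one, add_zero, sub_zero]
      rw [assignAll_cons, assignAll_cons, assignAll_nil]
      rw [show lo + (1 : Int) = hi from by omega, show hi - (1 : Int) = lo from by omega]
  · -- lo = hi : no swap, and the single write-back is a self-assignment
    have hlh : lo = hi := by omega
    rw [revSwapB, if_neg hlt]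
    unfold mkFor
    rw [show (hi + 1 - lo).toNat = 1 from by omega, List.range_one]
    simp only [List.map_cons, List.map_nil, Nat.cast_zero, add_zero, sub_zero]
    rw [assignAll_cons, assignAll_nil, hlh,
      List.getD_eq_getElem _ _ (pvPos_lt _ _ (by omega) (by omega) hn0),
      List.set_getElem_self]

-- ===== VERDICT (by name: the statement is the Claim_ definition above) =====
theorem applyReversal_spec : Claim_equal_applyReversal := by
  intro p i j _ hPre
  obtain ⟨h1, h2, h3⟩ := hPre
  unfold Spec_applyReversal applyReversal applyReversal_alt
  by_cases hij : i > j
  · have hmin : min i j = j := min_eq_right (le_of_lt hij)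
    have hmax : max i j = i := max_eq_left (le_of_lt hij)
    rw [hmin] at h1; rw [hmax] at h2; rw [hmax, hmin] at h3
    simp only [if_pos hij]
    rw [A_norm p j i h1 h2 (le_of_lt hij) h3,
      B_main (i - j).toNat p j i rfl h1 (le_of_lt hij) h2 h3]
  · have hle : i ≤ j := le_of_not_gt hij
    have hmin : min i j = i := min_eq_left hle
    have hmax : max i j = j := max_eq_right hle
    rw [hmin] at h1; rw [hmax] at h2; rw [hmax, hmin] at h3
    simp only [if_neg hij]
    rw [A_norm p i j h1 h2 hle h3,
      B_main (j - i).toNat p i j rfl h1 hle h2 h3]
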